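-- pv_equiv track=rewrite | github.com/Matans844/EPIJudge | src/work/Chapter05/problems/dutch_national_flag_variation_01.py | compare_by_ordering
-- ===== SOURCE A (Python) =====
-- def compare_by_ordering(x, y, ordering):
--     """
--     A custom comparison function that performs comparison according to a given
--     precedence ordering.
--
--     Parameters:
--     - x, y: the two objects to be compared
--     - ordering: a tuple containing the objects in the order of precedence,
--                 from highest to lowest
--
--     Returns:
--     - -1 if x < y
--     - 0 if x == y
--     - 1 if x > y
--     """
--     if x == y:
--         return 0
--     for i, obj in enumerate(ordering):
--         if x == obj:
--             return -1
--         elif y == obj: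
--             return 1
--     # if neither x nor y are in the ordering, compare their values
--     return (x > y) - (x < y)
-- ===== SOURCE B (Python) =====
-- def compare_by_ordering(x, y, ordering):
--     if x == y:
--         return 0
--     ix = ordering.index(x) if x in ordering else None
--     iy = ordering.index(y) if y in ordering else None
--     if ix is None and iy is None:
--         return (x > y) - (x < y)
--     if iy is None:
--         return -1
--     if ix is None:
--         return 1
--     return -1 if ix < iy else 1
-- ===== Notes on version B (the rewrite author's own statement) =====
-- stated objective: simpler
-- what changed: Replaces A's single early-returning scan with computing each operand's first index in the ordering separately and then comparing the two positions.
import Mathlib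
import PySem

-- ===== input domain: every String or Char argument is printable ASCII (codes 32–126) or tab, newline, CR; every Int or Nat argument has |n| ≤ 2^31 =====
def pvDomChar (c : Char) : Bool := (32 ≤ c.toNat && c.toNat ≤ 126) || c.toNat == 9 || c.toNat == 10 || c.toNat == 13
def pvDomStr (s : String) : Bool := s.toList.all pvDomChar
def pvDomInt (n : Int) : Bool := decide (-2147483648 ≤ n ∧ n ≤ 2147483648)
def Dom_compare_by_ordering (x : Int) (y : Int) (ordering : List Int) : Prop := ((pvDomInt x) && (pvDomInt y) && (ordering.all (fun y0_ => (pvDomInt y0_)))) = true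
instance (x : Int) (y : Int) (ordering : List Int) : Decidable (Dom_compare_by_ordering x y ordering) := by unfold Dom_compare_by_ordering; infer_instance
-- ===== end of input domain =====

-- B computes each operand's first index in the ordering separately and compares the two
-- positions, instead of A's single early-returning scan; objective: simpler decomposition.

-- ===== PORT A =====
-- the enumerate loop of A, early-returning on the first match of x or y
def pvLoopA (x y : Int) : List Int → Int
  | [] => (if x > y then 1 else 0) - (if x < y then 1 else 0)
  | obj :: rest => if x = obj then -1 else if y = obj then 1 else pvLoopA x y rest

def compare_by_ordering (x : Int) (y : Int) (ordering : List Int) : Int :=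
  if x = y then 0 else pvLoopA x y ordering

-- ===== PORT B =====
def compare_by_ordering_alt (x : Int) (y : Int) (ordering : List Int) : Int :=
  if x = y then 0
  else
    let ix := if x ∈ ordering then PySem.List.index? ordering x else none
    let iy := if y ∈ ordering then PySem.List.index? ordering y else none
    match ix, iy with
    | none, none => (if x > y then 1 else 0) - (if x < y then 1 else 0)
    | _, none => -1
    | none, _ => 1
    | some i, some j => if i < j then -1 else 1

-- ===== PRECONDITION & SPEC =====
def Spec_compare_by_ordering (x : Int) (y : Int) (ordering : List Int) (out : Int) : Prop := out = compare_by_ordering_alt x y ordering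
instance (x : Int) (y : Int) (ordering : List Int) (out : Int) : Decidable (Spec_compare_by_ordering x y ordering out) := by unfold Spec_compare_by_ordering; infer_instance

-- ===== CLAIM =====
def Claim_equal_compare_by_ordering : Prop := ∀ (x : Int) (y : Int) (ordering : List Int), Dom_compare_by_ordering x y ordering → Spec_compare_by_ordering x y ordering (compare_by_ordering x y ordering)

-- ===== LEMMAS AND PROOFS =====
theorem pvLoopA_eq (x y : Int) (l : List Int) (hxy : x ≠ y) :
    pvLoopA x y l =
      match (if x ∈ l then PySem.List.index? l x else none),
            (if y ∈ l then PySem.List.index? l y else none) with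
      | none, none => (if x > y then 1 else 0) - (if x < y then 1 else 0)
      | _, none => -1
      | none, _ => 1
      | some i, some j => if i < j then (-1 : Int) else 1 := by
  induction l with
  | nil => simp [pvLoopA]
  | cons o rest ih =>
    simp only [pvLoopA]
    by_cases hx : x = o
    · subst hx
      rw [if_pos rfl]
      have hmx : x ∈ x :: rest := List.mem_cons_self
      rw [if_pos hmx, PySem.List.index?_cons_self]
      by_cases hy : y ∈ rest
      · rw [if_pos (List.mem_cons_of_mem _ hy), PySem.List.index?_cons_of_ne rest hxy]
        cases PySem.List.index? rest y with
        | none => simp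
        | some j => simp
      · have hny : y ∉ x :: rest := by
          simp only [List.mem_cons, not_or]; exact ⟨Ne.symm hxy, hy⟩
        rw [if_neg hny]
    · rw [if_neg hx]
      by_cases hy : y = o
      · subst hy
        rw [if_pos rfl]
        have hmy : y ∈ y :: rest := List.mem_cons_self
        rw [if_pos hmy, PySem.List.index?_cons_self]
        by_cases hxm : x ∈ rest
        · rw [if_pos (List.mem_cons_of_mem _ hxm), PySem.List.index?_cons_of_ne rest (Ne.symm hxy)]
          cases PySem.List.index? rest x with
          | none => simp
          | some i => simp
        · have hnx : x ∉ y :: rest := by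
            simp only [List.mem_cons, not_or]; exact ⟨hxy, hxm⟩
          rw [if_neg hnx]
      · rw [if_neg hy, ih]
        have hmx : (x ∈ o :: rest) ↔ (x ∈ rest) := by simp [List.mem_cons, hx]
        have hmy : (y ∈ o :: rest) ↔ (y ∈ rest) := by simp [List.mem_cons, hy]
        simp only [hmx, hmy]
        by_cases h1 : x ∈ rest
        · by_cases h2 : y ∈ rest
          · simp only [h1, h2, if_true,
              PySem.List.index?_cons_of_ne rest (Ne.symm hx),
              PySem.List.index?_cons_of_ne rest (Ne.symm hy)]
            cases PySem.List.index? rest x with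
            | none => cases PySem.List.index? rest y with
              | none => rfl
              | some j => simp
            | some i => cases PySem.List.index? rest y with
              | none => simp
              | some j => simp
          · simp only [h1, h2, if_true, if_false,
              PySem.List.index?_cons_of_ne rest (Ne.symm hx)]
            cases PySem.List.index? rest x with
            | none => rfl
            | some i => simp
        · by_cases h2 : y ∈ rest
          · simp only [h1, h2, if_true, if_false,
              PySem.List.index?_cons_of_ne rest (Ne.symm hy)]
            cases PySem.List.index? rest y with
            | none => rfl
            | some j => simp
          · simp only [h1, h2, if_false]

-- ===== VERDICT =====
theorem compare_by_ordering_spec : Claim_equal_compare_by_ordering := by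
  intro x y ordering _
  unfold Spec_compare_by_ordering compare_by_ordering compare_by_ordering_alt
  by_cases h : x = y
  · simp [h]
  · simp only [if_neg h]
    exact pvLoopA_eq x y ordering h
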